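-- pv_equiv track=rewrite | github.com/Ivan753/mirea-work-7s | is/swivel_grille.py | get_pattern_variant
-- ===== SOURCE A (Python) =====
-- def get_pattern_variant(pattern, n):
--     if n == 0:
--         return pattern
--
--     k = len(pattern) if n%2 != 0 else len(pattern) // 2
--     m = len(pattern[0]) // 2 if n%2 != 0 else len(pattern[0])
--
--     for i in range(k):
--         for j in range(m):
--             temp = pattern[i][j]
--
--             if n%2 != 0:
--                 pattern[i][j] = pattern[i][len(pattern[i]) - j - 1]
--                 pattern[i][len(pattern[i]) - j - 1] = temp
--             else:
--                 pattern[i][j] = pattern[len(pattern) - i - 1][j]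
--                 pattern[len(pattern) - i - 1][j] = temp
--
--     return pattern
-- ===== SOURCE B (Python) =====
-- # B: builds a NEW grid by one uniform nested comprehension over a coordinate
-- # map ((i,j) -> (i, C-1-j) for odd n, (R-1-i, j) for even n), instead of A's
-- # in-place half-range temp-swap loops; A mutates pattern in place, B does not
-- # (equivalence is about the return value on non-empty rectangular patterns).
-- def get_pattern_variant(pattern, n):
--     if n == 0:
--         return pattern
--     R, C = len(pattern), len(pattern[0])
--     odd = n % 2 != 0
--     return [[pattern[i if odd else R - 1 - i][C - 1 - j if odd else j]
--              for j in range(C)]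
--             for i in range(R)]
-- ===== Notes on version B (the rewrite author's own statement) =====
-- stated objective: simpler
-- what changed: Replaces A's in-place half-range temp-swap double loops (separate element-swap and row-swap passes with bounds k,m derived from row 0) by an out-of-place construction: one uniform nested comprehension that reads each source cell once through a coordinate map ((i,j)->(i,C-1-j) for odd n, (R-1-i,j) for even n) and returns the new grid; A mutates pattern in place, B does not.
-- outside the precondition, e.g. on get_pattern_variant([[1, 2, 3, 4], [5, 6]], 1): A returns [[4, 3, 2, 1], [5, 6]], B raises IndexError; on get_pattern_variant([[1], [2, 3]], 2): A returns [[2], [1, 3]], B returns [[2], [1]]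
import Mathlib
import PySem

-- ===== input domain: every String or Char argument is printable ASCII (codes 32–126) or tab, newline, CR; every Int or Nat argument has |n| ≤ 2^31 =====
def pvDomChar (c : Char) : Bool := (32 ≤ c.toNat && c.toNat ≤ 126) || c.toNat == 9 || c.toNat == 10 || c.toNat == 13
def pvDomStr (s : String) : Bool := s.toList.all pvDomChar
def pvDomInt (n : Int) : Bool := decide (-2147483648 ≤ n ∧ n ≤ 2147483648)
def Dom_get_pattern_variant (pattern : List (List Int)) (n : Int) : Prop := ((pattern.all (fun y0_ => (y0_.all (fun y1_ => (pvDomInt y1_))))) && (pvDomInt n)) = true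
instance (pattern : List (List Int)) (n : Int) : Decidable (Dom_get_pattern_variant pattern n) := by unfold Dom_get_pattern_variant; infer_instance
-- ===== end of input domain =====

-- B replaces A's in-place half-range temp-swap double loops by an out-of-place
-- construction: one uniform nested comprehension reading each source cell once
-- through a coordinate map; objective: simpler.  A mutates `pattern` in place
-- and B does not: the equivalence proved here is about the return value only.

-- ===== PORT A =====
def get_pattern_variant (pattern : List (List Int)) (n : Int) : List (List Int) :=
  if n = 0 then pattern else
  let k : Int := if PySem.Int.mod n 2 ≠ 0 then (pattern.length : Int) else PySem.Int.floordiv (pattern.length : Int) 2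
  let m : Int := if PySem.Int.mod n 2 ≠ 0 then PySem.Int.floordiv ((PySem.List.pyGetD pattern 0 []).length : Int) 2 else ((PySem.List.pyGetD pattern 0 []).length : Int)
  (PySem.List.pyRange 0 k 1).foldl (fun pat i =>
    (PySem.List.pyRange 0 m 1).foldl (fun pat j =>
      let temp := PySem.List.pyGetD (PySem.List.pyGetD pat i []) j 0
      if PySem.Int.mod n 2 ≠ 0 then
        -- pattern[i][j] = pattern[i][len(pattern[i]) - j - 1]; pattern[i][len(pattern[i]) - j - 1] = temp
        let row := PySem.List.pyGetD pat i []
        let row' := PySem.List.pySetD row j (PySem.List.pyGetD row ((row.length : Int) - j - 1) 0)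
        PySem.List.pySetD pat i (PySem.List.pySetD row' ((row'.length : Int) - j - 1) temp)
      else
        -- pattern[i][j] = pattern[len(pattern) - i - 1][j]; pattern[len(pattern) - i - 1][j] = temp
        let pat2 := PySem.List.pySetD pat i (PySem.List.pySetD (PySem.List.pyGetD pat i []) j (PySem.List.pyGetD (PySem.List.pyGetD pat ((pat.length : Int) - i - 1) []) j 0))
        PySem.List.pySetD pat2 ((pat2.length : Int) - i - 1) (PySem.List.pySetD (PySem.List.pyGetD pat2 ((pat2.length : Int) - i - 1) []) j temp)
    ) pat) pattern

-- ===== PORT B =====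
def get_pattern_variant_alt (pattern : List (List Int)) (n : Int) : List (List Int) :=
  if n = 0 then pattern else
  -- R, C = len(pattern), len(pattern[0]); odd = n % 2 != 0
  let R : Int := (pattern.length : Int)
  let C : Int := ((PySem.List.pyGetD pattern 0 []).length : Int)
  let odd : Bool := decide (PySem.Int.mod n 2 ≠ 0)
  -- [[pattern[i if odd else R-1-i][C-1-j if odd else j] for j in range(C)] for i in range(R)]
  (PySem.List.pyRange 0 R 1).map (fun i =>
    (PySem.List.pyRange 0 C 1).map (fun j =>
      PySem.List.pyGetD
        (PySem.List.pyGetD pattern (if odd then i else R - 1 - i) [])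
        (if odd then C - 1 - j else j) 0))

-- ===== PRECONDITION & SPEC =====
-- Pre_ restricts to the natural domain (non-empty rectangular grids) when n ≠ 0:
-- A raises IndexError on an empty pattern and on rows shorter than row 0's width,
-- and on other ragged patterns A's partial per-row swaps (bounds k, m taken from
-- row 0) are an artefact of its implementation.
def Pre_get_pattern_variant (pattern : List (List Int)) (n : Int) : Prop :=
  n = 0 ∨ (pattern ≠ [] ∧ ∀ row ∈ pattern, row.length = (pattern.headD []).length)
instance (pattern : List (List Int)) (n : Int) : Decidable (Pre_get_pattern_variant pattern n) := by
  unfold Pre_get_pattern_variant; infer_instance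
def pvWitness_get_pattern_variant : List (List Int) × Int := ([[1, 2], [3, 4]], 1)
def Spec_get_pattern_variant (pattern : List (List Int)) (n : Int) (out : List (List Int)) : Prop := out = get_pattern_variant_alt pattern n
instance (pattern : List (List Int)) (n : Int) (out : List (List Int)) : Decidable (Spec_get_pattern_variant pattern n out) := by unfold Spec_get_pattern_variant; infer_instance

-- ===== CLAIM (what is proved, stated in full; the proofs are below) =====
def Claim_equal_get_pattern_variant : Prop := ∀ (pattern : List (List Int)) (n : Int), Dom_get_pattern_variant pattern n → Pre_get_pattern_variant pattern n → Spec_get_pattern_variant pattern n (get_pattern_variant pattern n)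

-- ===== LEMMAS AND PROOFS =====

theorem getD_set {α : Type} (l : List α) (i : Nat) (a : α) (p : Nat) (d : α) :
    (l.set i a).getD p d = if i = p ∧ i < l.length then a else l.getD p d := by
  simp only [List.getD_eq_getElem?_getD, List.getElem?_set]
  split_ifs with h1 h2 h3 <;> simp_all
  omega

-- the two-sided swap step of an in-place reversal
def swap2 {α : Type} (d : α) (xs : List α) (t : Nat) : List α :=
  (xs.set t (xs.getD (xs.length - 1 - t) d)).set (xs.length - 1 - t) (xs.getD t d)

theorem length_swap2 {α : Type} (d : α) (xs : List α) (t : Nat) :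
    (swap2 d xs t).length = xs.length := by simp [swap2]

theorem swapfold_inv {α : Type} (d : α) (xs : List α) (t : Nat) (ht : 2 * t ≤ xs.length) :
    ((List.range t).foldl (swap2 d) xs).length = xs.length ∧
    ∀ p, p < xs.length →
      ((List.range t).foldl (swap2 d) xs).getD p d =
        if p < t ∨ xs.length - t ≤ p then xs.getD (xs.length - 1 - p) d else xs.getD p d := by
  induction t with
  | zero => refine ⟨rfl, fun p hp => ?_⟩; simp; omega
  | succ t ih =>
      obtain ⟨hl, hp⟩ := ih (by omega)
      rw [List.range_succ, List.foldl_append, List.foldl_cons, List.foldl_nil]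
      set y := (List.range t).foldl (swap2 d) xs with hy
      have hlen : (swap2 d y t).length = y.length := by simp [swap2]
      refine ⟨by rw [hlen, hl], fun p hplt => ?_⟩
      have hyt : y.getD t d = xs.getD t d := by
        rw [hp t (by omega)]; rw [if_neg (by omega)]
      have hymt : y.getD (xs.length - 1 - t) d = xs.getD (xs.length - 1 - t) d := by
        rw [hp (xs.length - 1 - t) (by omega)]; rw [if_neg (by omega)]
      simp only [swap2, hl, getD_set, List.length_set]
      by_cases h1 : p = xs.length - 1 - t
      · subst h1
        rw [if_pos ⟨rfl, by omega⟩, if_pos (by omega), hyt]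
        congr 1; omega
      · rw [if_neg (by simp; omega)]
        by_cases h2 : p = t
        · subst h2
          rw [if_pos ⟨rfl, by omega⟩, if_pos (by omega), hymt]
        · rw [if_neg (by simp; omega), hp p hplt]
          by_cases h3 : p < t ∨ xs.length - t ≤ p
          · rw [if_pos h3, if_pos (by omega)]
          · rw [if_neg h3, if_neg (by omega)]

theorem swapfold_rev {α : Type} (d : α) (xs : List α) :
    (List.range (xs.length / 2)).foldl (swap2 d) xs = xs.reverse := by
  obtain ⟨hl, hp⟩ := swapfold_inv d xs (xs.length / 2) (by omega)
  apply List.ext_getElem (by simp [hl])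
  intro p h1 h2
  have hplt : p < xs.length := by rwa [hl] at h1
  have := hp p hplt
  rw [List.getD_eq_getElem _ _ h1] at this
  rw [this, List.getElem_reverse]
  by_cases h3 : p < xs.length / 2 ∨ xs.length - xs.length / 2 ≤ p
  · rw [if_pos h3, List.getD_eq_getElem _ _ (by omega)]
  · rw [if_neg h3]
    rw [List.getD_eq_getElem _ _ (by omega)]
    congr 1
    omega

-- a fold whose body agrees with a better-behaved one under an invariant that body preserves
theorem foldl_congr_inv {α β : Type} (P : α → Prop) (f g : α → β → α) (l : List β) (init : α)
    (h0 : P init) (hg : ∀ a b, P a → b ∈ l → P (g a b))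
    (hfg : ∀ a b, P a → b ∈ l → f a b = g a b) :
    l.foldl f init = l.foldl g init := by
  induction l generalizing init with
  | nil => rfl
  | cons b l ih =>
      simp only [List.foldl_cons]
      rw [hfg init b h0 (by simp)]
      exact ih (g init b) (hg init b h0 (by simp))
        (fun a c ha hc => hg a c ha (by simp [hc]))
        (fun a c ha hc => hfg a c ha (by simp [hc]))

theorem foldl_inv {α β : Type} (P : α → Prop) (g : α → β → α) (l : List β) (init : α)
    (h0 : P init) (hg : ∀ a b, P a → b ∈ l → P (g a b)) : P (l.foldl g init) := by
  induction l generalizing init with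
  | nil => exact h0
  | cons b l ih =>
      exact ih (g init b) (hg init b h0 (by simp)) (fun a c ha hc => hg a c ha (by simp [hc]))

-- a fold that rewrites only slot i collapses to one set
theorem foldl_set_single {α : Type} (d : α) (pat : List α) (i : Nat) (hi : i < pat.length)
    (g : α → Nat → α) (l : List Nat) :
    l.foldl (fun p j => p.set i (g (p.getD i d) j)) pat = pat.set i (l.foldl g (pat.getD i d)) := by
  induction l generalizing pat with
  | nil => simp [List.set_getElem_self, hi]
  | cons b l ih =>
      simp only [List.foldl_cons]
      rw [ih (pat.set i (g (pat.getD i d) b)) (by simpa using hi)]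
      rw [List.set_set]
      congr 1
      rw [List.getD_eq_getElem?_getD, List.getElem?_set_self (by omega)]
      simp

-- updating every slot once, in order, is a map
theorem foldl_set_map {α : Type} (d : α) (f : α → α) (xs : List α) (t : Nat) (ht : t ≤ xs.length) :
    (List.range t).foldl (fun ys i => ys.set i (f (ys.getD i d))) xs
      = (xs.take t).map f ++ xs.drop t := by
  induction t with
  | zero => simp
  | succ t ih =>
      rw [List.range_succ, List.foldl_append, List.foldl_cons, List.foldl_nil, ih (by omega)]
      have hlt : t < xs.length := by omega
      have hpre : ((xs.take t).map f).length = t := by simp; omega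
      have hdrop : xs.drop t = xs[t] :: xs.drop (t + 1) := (List.getElem_cons_drop hlt).symm
      have hgetD : ((xs.take t).map f ++ xs.drop t).getD t d = xs[t] := by
        rw [List.getD_eq_getElem?_getD, List.getElem?_append_right (by omega), hpre, hdrop]
        simp [List.getElem?_eq_getElem hlt]
      rw [hgetD, List.set_append_right _ _ (by omega), hpre, Nat.sub_self, hdrop,
        List.set_cons_zero]
      rw [List.take_add_one, List.getElem?_eq_getElem hlt]
      simp only [Option.toList_some, List.map_append, List.map_cons, List.map_nil,
        List.append_assoc, List.cons_append, List.nil_append]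

-- reading every slot once through an index map, in order, is a map / a reversal
theorem range_map_getD_map {α β : Type} (xs : List α) (d : α) (g : α → β) :
    (List.range xs.length).map (fun i => g (xs.getD i d)) = xs.map g := by
  apply List.ext_getElem (by simp)
  intro p h1 h2
  simp only [List.getElem_map, List.getElem_range]
  rw [List.getD_eq_getElem _ _ (by simpa using h2)]

theorem range_map_getD_rev {α : Type} (xs : List α) (d : α) :
    (List.range xs.length).map (fun j => xs.getD (xs.length - 1 - j) d) = xs.reverse := by
  apply List.ext_getElem (by simp)
  intro p h1 h2
  simp only [List.getElem_map, List.getElem_range, List.getElem_reverse]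
  have hp : p < xs.length := by simpa using h1
  rw [List.getD_eq_getElem _ _ (by omega)]

-- one column step of A's even-n row exchange (rows a and b), at Nat level
def colSwapBody (a b : Nat) (pat : List (List Int)) (j : Nat) : List (List Int) :=
  (pat.set a ((pat.getD a []).set j ((pat.getD b []).getD j 0))).set b
    ((pat.getD b []).set j ((pat.getD a []).getD j 0))

theorem swapRowsFold_aux (pat : List (List Int)) (a b : Nat) (hab : a ≠ b)
    (ha : a < pat.length) (hb : b < pat.length) (c : Nat)
    (hca : (pat.getD a []).length = c) (hcb : (pat.getD b []).length = c)
    (t : Nat) (ht : t ≤ c) :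
    (List.range t).foldl (colSwapBody a b) pat =
      (pat.set a ((pat.getD b []).take t ++ (pat.getD a []).drop t)).set b
        ((pat.getD a []).take t ++ (pat.getD b []).drop t) := by
  set ra := pat.getD a [] with hra
  set rb := pat.getD b [] with hrb
  induction t with
  | zero =>
      simp only [List.range_zero, List.foldl_nil, List.take_zero, List.drop_zero,
        List.nil_append]
      rw [hra, hrb, List.getD_eq_getElem _ _ ha, List.getD_eq_getElem _ _ hb,
        List.set_getElem_self, List.set_getElem_self]
  | succ t ih =>
      have htc : t < c := by omega
      rw [List.range_succ, List.foldl_append, List.foldl_cons, List.foldl_nil, ih (by omega)]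
      have hlen1 : ((pat.set a (rb.take t ++ ra.drop t)).set b (ra.take t ++ rb.drop t)).length = pat.length := by simp
      have hga : ((pat.set a (rb.take t ++ ra.drop t)).set b (ra.take t ++ rb.drop t)).getD a [] = rb.take t ++ ra.drop t := by
        rw [getD_set, if_neg (by omega), getD_set, if_pos ⟨rfl, ha⟩]
      have hgb : ((pat.set a (rb.take t ++ ra.drop t)).set b (ra.take t ++ rb.drop t)).getD b [] = ra.take t ++ rb.drop t := by
        rw [getD_set, if_pos ⟨rfl, by simpa using hb⟩]
      have htake : ∀ (u v : List Int), u.length = c → v.length = c →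
          (u.take t ++ v.drop t).set t ((v.take t ++ u.drop t).getD t 0) = u.take (t + 1) ++ v.drop (t + 1) := by
        intro u v hu hv
        have hu1 : (u.take t).length = t := by simp; omega
        have hv1 : (v.take t).length = t := by simp; omega
        have hud : u.drop t = u[t] :: u.drop (t + 1) := (List.getElem_cons_drop (by omega)).symm
        have hvd : v.drop t = v[t] :: v.drop (t + 1) := (List.getElem_cons_drop (by omega)).symm
        have hgd : (v.take t ++ u.drop t).getD t 0 = u[t] := by
          rw [List.getD_eq_getElem?_getD, List.getElem?_append_right (by omega), hv1, hud]
          simp [List.getElem?_eq_getElem (show t < u.length by omega)]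
        rw [hgd, List.set_append_right _ _ (by omega), hu1, Nat.sub_self, hvd, List.set_cons_zero]
        rw [List.take_add_one, List.getElem?_eq_getElem (show t < u.length by omega)]
        simp only [Option.toList_some, List.append_assoc, List.singleton_append]
      unfold colSwapBody
      rw [hga, hgb]
      have hca' : ra.length = c := hca
      have hcb' : rb.length = c := hcb
      rw [htake rb ra hcb' hca', htake ra rb hca' hcb']
      rw [List.set_comm _ _ (by omega : b ≠ a), List.set_set, List.set_set]

theorem swapRowsFold (pat : List (List Int)) (a b : Nat) (hab : a ≠ b)
    (ha : a < pat.length) (hb : b < pat.length) (c : Nat)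
    (hca : (pat.getD a []).length = c) (hcb : (pat.getD b []).length = c) :
    (List.range c).foldl (colSwapBody a b) pat =
      (pat.set a (pat.getD b [])).set b (pat.getD a []) := by
  rw [swapRowsFold_aux pat a b hab ha hb c hca hcb c le_rfl]
  rw [List.take_of_length_le (by omega), List.take_of_length_le (by omega),
    List.drop_of_length_le (by omega), List.drop_of_length_le (by omega)]
  simp

-- the rectangular-grid invariant the loops preserve
def GridInv (L c : Nat) (pat : List (List Int)) : Prop :=
  pat.length = L ∧ ∀ row ∈ pat, row.length = c

theorem gridInv_set (L c : Nat) (pat : List (List Int)) (i : Nat) (row : List Int)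
    (h : GridInv L c pat) (hr : row.length = c) : GridInv L c (pat.set i row) := by
  obtain ⟨h1, h2⟩ := h
  refine ⟨by simp [h1], fun r hrm => ?_⟩
  rcases List.mem_or_eq_of_mem_set hrm with h | h
  · exact h2 r h
  · rw [h, hr]

theorem gridInv_row_len (L c : Nat) (pat : List (List Int)) (i : Nat)
    (h : GridInv L c pat) (hi : i < L) : (pat.getD i []).length = c := by
  obtain ⟨h1, h2⟩ := h
  have hilt : i < pat.length := by omega
  rw [List.getD_eq_getElem _ _ hilt]
  exact h2 _ (List.getElem_mem hilt)

theorem gridInv_swap2 (L c : Nat) (pat : List (List Int)) (i : Nat)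
    (h : GridInv L c pat) (hi : i < L) : GridInv L c (swap2 [] pat i) := by
  have hl : pat.length = L := h.1
  have h1 := gridInv_row_len L c pat i h hi
  have h2 := gridInv_row_len L c pat (L - 1 - i) h (by omega)
  unfold swap2
  rw [hl]
  exact gridInv_set L c _ _ _ (gridInv_set L c _ _ _ h h2) h1

theorem gridInv_colSwap (L c : Nat) (pat : List (List Int)) (a b j : Nat)
    (h : GridInv L c pat) (ha : a < L) (hb : b < L) :
    GridInv L c (colSwapBody a b pat j) := by
  have h1 := gridInv_row_len L c pat a h ha
  have h2 := gridInv_row_len L c pat b h hb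
  unfold colSwapBody
  refine gridInv_set L c _ _ _ (gridInv_set L c _ _ _ h ?_) ?_
  · rw [List.length_set]; exact h1
  · rw [List.length_set]; exact h2

-- A's result in closed form on rectangular grids: each row reversed (odd n)
theorem portA_odd (pattern : List (List Int)) (n : Int) (h0 : n ≠ 0)
    (hod : PySem.Int.mod n 2 = 1)
    (hrect : ∀ row ∈ pattern, row.length = (pattern.headD []).length) :
    get_pattern_variant pattern n = pattern.map List.reverse := by
  have hrow0 : PySem.List.pyGetD pattern 0 [] = pattern.headD [] := by
    rw [PySem.List.pyGetD_zero]
    cases pattern with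
    | nil => rfl
    | cons r t => rfl
  have hdiv2 : PySem.Int.floordiv (((pattern.headD []).length : Nat) : Int) 2
      = (((pattern.headD []).length / 2 : Nat) : Int) := by
    exact_mod_cast PySem.Int.floordiv_natCast (pattern.headD []).length 2
  simp only [get_pattern_variant, if_neg h0, hod, ne_eq, one_ne_zero, not_false_eq_true,
    if_true]
  simp only [hrow0, hdiv2, PySem.List.pyRange_zero_natCast, List.foldl_map]
  refine Eq.trans (foldl_congr_inv (GridInv pattern.length (pattern.headD []).length) _
    (fun pat t => pat.set t ((List.range ((pattern.headD []).length / 2)).foldl (swap2 0) (pat.getD t [])))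
    _ _ ⟨rfl, hrect⟩ ?_ ?_) ?_
  · intro pat t hP ht
    refine gridInv_set _ _ _ _ _ hP ?_
    have hrow := gridInv_row_len _ _ pat t hP (List.mem_range.mp ht)
    exact foldl_inv (fun r : List Int => r.length = (pattern.headD []).length) _ _ _ hrow
      (fun r j hr _ => by
        show (swap2 0 r j).length = (pattern.headD []).length
        rw [length_swap2]; exact hr)
  · intro pat t hP ht
    have hlen : pat.length = pattern.length := hP.1
    have htL : t < pattern.length := List.mem_range.mp ht
    refine Eq.trans (foldl_congr_inv (GridInv pattern.length (pattern.headD []).length) _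
      (fun p j => p.set t (swap2 0 (p.getD t []) j)) _ _ hP ?_ ?_) ?_
    · intro pat' j hP' _
      refine gridInv_set _ _ _ _ _ hP' ?_
      have hrow := gridInv_row_len _ _ pat' t hP' htL
      show (swap2 0 (pat'.getD t []) j).length = (pattern.headD []).length
      rw [length_swap2]; exact hrow
    · intro pat' j hP' hj
      have hrowlen : (pat'.getD t []).length = (pattern.headD []).length :=
        gridInv_row_len _ _ pat' t hP' htL
      have hj2 : j < (pattern.headD []).length / 2 := List.mem_range.mp hj
      have hcast : ((pat'.getD t []).length : Int) - (j : Int) - 1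
          = (((pattern.headD []).length - 1 - j : Nat) : Int) := by
        rw [hrowlen]; omega
      simp only [PySem.List.pyGetD_natCast, PySem.List.pySetD_natCast,
        List.length_set, hcast]
      unfold swap2
      rw [hrowlen]
    · exact foldl_set_single [] pat t (by omega) (swap2 0) _
  · have hmap := foldl_set_map ([] : List Int)
      (fun row => (List.range ((pattern.headD []).length / 2)).foldl (swap2 0) row)
      pattern pattern.length le_rfl
    rw [List.take_length, List.drop_length, List.append_nil] at hmap
    rw [hmap]
    refine List.map_congr_left (fun row hrow => ?_)
    rw [show (pattern.headD []).length / 2 = row.length / 2 by rw [hrect row hrow]]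
    exact swapfold_rev 0 row

-- A's result in closed form on rectangular grids: rows in reverse order (even n ≠ 0)
theorem portA_even (pattern : List (List Int)) (n : Int) (h0 : n ≠ 0)
    (hev : PySem.Int.mod n 2 = 0)
    (hrect : ∀ row ∈ pattern, row.length = (pattern.headD []).length) :
    get_pattern_variant pattern n = pattern.reverse := by
  have hrow0 : PySem.List.pyGetD pattern 0 [] = pattern.headD [] := by
    rw [PySem.List.pyGetD_zero]
    cases pattern with
    | nil => rfl
    | cons r t => rfl
  have hdiv : PySem.Int.floordiv (pattern.length : Int) 2 = ((pattern.length / 2 : Nat) : Int) := by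
    exact_mod_cast PySem.Int.floordiv_natCast pattern.length 2
  simp only [get_pattern_variant, if_neg h0, hev, ne_eq, not_true_eq_false, if_false]
  simp only [hdiv, hrow0, PySem.List.pyRange_zero_natCast, List.foldl_map]
  refine Eq.trans (b := (List.range (pattern.length / 2)).foldl (swap2 []) pattern)
    ?_ (swapfold_rev [] pattern)
  refine foldl_congr_inv (GridInv pattern.length (pattern.headD []).length) _ _ _ _
    ⟨rfl, hrect⟩ (fun pat i hP hi => gridInv_swap2 _ _ _ _ hP (by
      have := List.mem_range.mp hi; omega)) ?_
  intro pat i hP hi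
  have hiL2 : i < pattern.length / 2 := List.mem_range.mp hi
  have hlen : pat.length = pattern.length := hP.1
  have hc := gridInv_row_len _ _ pat i hP (by omega)
  have hc' := gridInv_row_len _ _ pat (pattern.length - 1 - i) hP (by omega)
  refine Eq.trans (foldl_congr_inv (GridInv pattern.length (pattern.headD []).length) _
    (colSwapBody i (pattern.length - 1 - i)) _ _ hP
    (fun pat' j hP' _ => gridInv_colSwap _ _ _ _ _ _ hP' (by omega) (by omega)) ?_) ?_
  · intro pat' j hP' hj
    have hlen' : pat'.length = pattern.length := hP'.1
    have hcast1 : (pat'.length : Int) - (i : Int) - 1 = ((pattern.length - 1 - i : Nat) : Int) := by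
      rw [hlen']; omega
    simp only [PySem.List.pyGetD_natCast, PySem.List.pySetD_natCast,
      List.length_set, hcast1]
    rw [getD_set, if_neg (by omega)]
    rfl
  · rw [swapRowsFold pat i (pattern.length - 1 - i) (by omega) (by omega) (by omega)
      (pattern.headD []).length hc hc']
    unfold swap2
    rw [hlen]

-- B's result in the same closed forms on rectangular grids
theorem portB_odd (pattern : List (List Int)) (n : Int) (h0 : n ≠ 0)
    (hod : PySem.Int.mod n 2 = 1)
    (hrect : ∀ row ∈ pattern, row.length = (pattern.headD []).length) :
    get_pattern_variant_alt pattern n = pattern.map List.reverse := by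
  have hrow0 : PySem.List.pyGetD pattern 0 [] = pattern.headD [] := by
    rw [PySem.List.pyGetD_zero]
    cases pattern with
    | nil => rfl
    | cons r t => rfl
  have hG : GridInv pattern.length (pattern.headD []).length pattern := ⟨rfl, hrect⟩
  simp only [get_pattern_variant_alt, if_neg h0, hod, hrow0, ne_eq, one_ne_zero,
    not_false_eq_true, decide_true, if_true,
    PySem.List.pyRange_zero_natCast, List.map_map, Function.comp_def]
  refine Eq.trans (List.map_congr_left (fun i hi => ?_))
    (range_map_getD_map pattern [] List.reverse)
  have hiL : i < pattern.length := List.mem_range.mp hi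
  rw [PySem.List.pyGetD_natCast]
  have hrl : (pattern.getD i []).length = (pattern.headD []).length :=
    gridInv_row_len _ _ pattern i hG hiL
  have hinner : ∀ j ∈ List.range (pattern.headD []).length,
      PySem.List.pyGetD (pattern.getD i []) (((pattern.headD []).length : Int) - 1 - (j : Int)) 0
        = (pattern.getD i []).getD ((pattern.getD i []).length - 1 - j) 0 := by
    intro j hj
    have hjC : j < (pattern.headD []).length := List.mem_range.mp hj
    have hcast : ((pattern.headD []).length : Int) - 1 - (j : Int)
        = (((pattern.getD i []).length - 1 - j : Nat) : Int) := by rw [hrl]; omega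
    rw [hcast, PySem.List.pyGetD_natCast]
  rw [List.map_congr_left hinner,
    show (pattern.headD []).length = (pattern.getD i []).length from hrl.symm,
    range_map_getD_rev (pattern.getD i []) 0]

theorem portB_even (pattern : List (List Int)) (n : Int) (h0 : n ≠ 0)
    (hev : PySem.Int.mod n 2 = 0)
    (hrect : ∀ row ∈ pattern, row.length = (pattern.headD []).length) :
    get_pattern_variant_alt pattern n = pattern.reverse := by
  have hrow0 : PySem.List.pyGetD pattern 0 [] = pattern.headD [] := by
    rw [PySem.List.pyGetD_zero]
    cases pattern with
    | nil => rfl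
    | cons r t => rfl
  have hG : GridInv pattern.length (pattern.headD []).length pattern := ⟨rfl, hrect⟩
  simp only [get_pattern_variant_alt, if_neg h0, hev, hrow0, ne_eq, not_true_eq_false,
    decide_false, ite_false, Bool.false_eq_true,
    PySem.List.pyRange_zero_natCast, List.map_map, Function.comp_def]
  refine Eq.trans (List.map_congr_left (fun i hi => ?_))
    (range_map_getD_rev pattern [])
  have hiL : i < pattern.length := List.mem_range.mp hi
  have hcast : (pattern.length : Int) - 1 - (i : Int)
      = ((pattern.length - 1 - i : Nat) : Int) := by omega
  rw [hcast, PySem.List.pyGetD_natCast]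
  have hrl : (pattern.getD (pattern.length - 1 - i) []).length = (pattern.headD []).length :=
    gridInv_row_len _ _ pattern _ hG (by omega)
  have hinner : ∀ j ∈ List.range (pattern.headD []).length,
      PySem.List.pyGetD (pattern.getD (pattern.length - 1 - i) []) ((j : Nat) : Int) 0
        = (pattern.getD (pattern.length - 1 - i) []).getD j 0 := by
    intro j hj
    rw [PySem.List.pyGetD_natCast]
  rw [List.map_congr_left hinner,
    show (pattern.headD []).length = (pattern.getD (pattern.length - 1 - i) []).length from hrl.symm]
  have := range_map_getD_map (pattern.getD (pattern.length - 1 - i) []) 0 (id : Int → Int)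
  simpa using this

-- ===== VERDICT (by name: the statement is the Claim_ definition above) =====
theorem get_pattern_variant_spec : Claim_equal_get_pattern_variant := by
  intro pattern n _ hpre
  unfold Spec_get_pattern_variant
  by_cases h0 : n = 0
  · simp [get_pattern_variant, get_pattern_variant_alt, h0]
  · obtain ⟨hne, hrect⟩ : pattern ≠ [] ∧ ∀ row ∈ pattern, row.length = (pattern.headD []).length := by
      rcases hpre with h | h
      · exact absurd h h0
      · exact h
    rcases PySem.Int.mod_two_eq n with hev | hod
    · rw [portA_even pattern n h0 hev hrect, portB_even pattern n h0 hev hrect]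
    · rw [portA_odd pattern n h0 hod hrect, portB_odd pattern n h0 hod hrect]
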